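-- pv_equiv track=rewrite | github.com/Fvaguirre/PoetToneWeb | detection.py | alliter
-- ===== SOURCE A (Python) =====
-- def alliter(Sentence_set):
--     result = []
--     for sen in Sentence_set:
--         sen_break = sen.split();
--         if (sen_break is None or  len(sen_break) == 0 or sen_break==" "):
--             continue
--         counter=1
--         threeorfour=1
--         last_character=''
--         for ele_in in sen_break:
--             if (ele_in[0]==last_character):
--                 threeorfour+=1
--                 if(counter==3):
--                     result.append(" ".join(sen_break) )
--             if(counter==1):
--                 last_character=ele_in[0]
--             counter+=1
--     return result
-- ===== SOURCE B (Python) =====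
-- def alliter(Sentence_set):
--     result = []
--     for sen in Sentence_set:
--         words = sen.split()
--         if len(words) >= 3 and words[2][0] == words[0][0]:
--             result.append(" ".join(words))
--     return result
-- ===== Notes on version B (the rewrite author's own statement) =====
-- stated objective: simpler
-- what changed: Replaces A's inner word loop with its stateful counter, dead threeorfour variable and last_character tracking by a direct per-sentence test: append ' '.join(words) iff there are at least three words and words[2][0] == words[0][0], which is exactly when A's counter==3 append fires; dropping the per-word loop gives a constant-factor speedup.
import Mathlib
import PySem

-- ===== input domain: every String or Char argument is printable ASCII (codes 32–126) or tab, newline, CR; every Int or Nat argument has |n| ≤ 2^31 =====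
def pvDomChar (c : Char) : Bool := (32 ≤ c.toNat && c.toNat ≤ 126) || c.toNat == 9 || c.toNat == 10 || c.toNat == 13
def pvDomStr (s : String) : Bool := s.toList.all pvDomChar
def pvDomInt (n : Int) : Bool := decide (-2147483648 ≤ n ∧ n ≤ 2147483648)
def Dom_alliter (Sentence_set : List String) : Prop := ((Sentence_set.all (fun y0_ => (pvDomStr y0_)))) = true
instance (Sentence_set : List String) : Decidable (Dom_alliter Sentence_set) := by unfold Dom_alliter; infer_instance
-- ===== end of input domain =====

-- B replaces A's stateful inner loop (counter / dead threeorfour / last_character) by a direct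
-- test: append " ".join(words) iff len(words) >= 3 and words[2][0] == words[0][0]; same results.

-- ===== PORT A =====
-- One iteration of A's inner 'for ele_in in sen_break' loop.  State = (result, counter,
-- threeorfour, last_character); Python's last_character starts as '' (never equal to any
-- 1-char string ele_in[0]), ported as 'none' of Option Char; ele_in[0] is Str.pyGet? (words
-- from split() are nonempty, so the none/IndexError case never occurs).
def alliterInner (j : String) (st : List String × Int × Int × Option Char) (w : String) :
    List String × Int × Int × Option Char :=
  let res := st.1
  let counter := st.2.1
  let threeorfour := st.2.2.1
  let last := st.2.2.2
  let c0 := PySem.Str.pyGet? w 0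
  let res2 := if c0 = last then (if counter = 3 then res ++ [j] else res) else res
  let tof2 := if c0 = last then threeorfour + 1 else threeorfour
  let last2 := if counter = 1 then c0 else last
  (res2, counter + 1, tof2, last2)

def alliter (Sentence_set : List String) : List String :=
  Sentence_set.foldl (fun result sen =>
    let sb := PySem.Str.split₀ sen
    -- Python's guard 'sen_break is None or len(sen_break) == 0 or sen_break == " "':
    -- only len(sen_break) == 0 can ever hold (split() never returns None, list ≠ str).
    if sb.length = 0 then result
    else (sb.foldl (alliterInner (PySem.Str.join " " sb)) (result, 1, 1, none)).1) []

-- ===== PORT B =====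
def alliter_alt (Sentence_set : List String) : List String :=
  Sentence_set.foldl (fun result sen =>
    let words := PySem.Str.split₀ sen
    if 3 ≤ words.length ∧
        PySem.Str.pyGet? (PySem.List.pyGetD words 2 "") 0
          = PySem.Str.pyGet? (PySem.List.pyGetD words 0 "") 0 then
      result ++ [PySem.Str.join " " words]
    else result) []

-- ===== PRECONDITION & SPEC =====
def Spec_alliter (Sentence_set : List String) (out : List String) : Prop := out = alliter_alt Sentence_set
instance (Sentence_set : List String) (out : List String) : Decidable (Spec_alliter Sentence_set out) := by unfold Spec_alliter; infer_instance

-- ===== CLAIM (what is proved, stated in full; the proofs are below) =====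
def Claim_equal_alliter : Prop := ∀ (Sentence_set : List String), Dom_alliter Sentence_set → Spec_alliter Sentence_set (alliter Sentence_set)

-- ===== LEMMAS AND PROOFS =====

-- Once counter has passed 3 it never comes back, so the inner loop appends nothing more.
theorem alliterInner_tail (rest : List String) (j : String) :
    ∀ (res : List String) (counter tof : Int) (last : Option Char), 4 ≤ counter →
      (rest.foldl (alliterInner j) (res, counter, tof, last)).1 = res := by
  induction rest with
  | nil => intro res counter tof last _; rfl
  | cons w rest ih =>
      intro res counter tof last h
      simp only [List.foldl_cons, alliterInner]
      have h3 : counter ≠ 3 := by omega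
      simp only [h3, if_false]
      split <;> exact ih _ _ _ _ (by omega)

-- Characterisation of A's inner loop: it appends the joined sentence exactly once, and
-- exactly when there are ≥ 3 words and word 3 starts with word 1's initial character.
theorem alliterInner_char (ws : List String) (j : String) (res : List String) :
    (ws.foldl (alliterInner j) (res, 1, 1, none)).1 =
      res ++ (if 3 ≤ ws.length ∧
          PySem.Str.pyGet? (PySem.List.pyGetD ws 2 "") 0
            = PySem.Str.pyGet? (PySem.List.pyGetD ws 0 "") 0 then [j] else []) := by
  match ws with
  | [] => simp
  | [a] =>
      simp only [List.foldl_cons, List.foldl_nil, alliterInner]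
      split <;> simp
  | [a, b] =>
      simp only [List.foldl_cons, List.foldl_nil, alliterInner]
      split <;> split <;> simp
  | a :: b :: c :: rest =>
      simp only [List.foldl_cons, alliterInner]
      norm_num
      rw [alliterInner_tail rest j _ 4 _ _ (le_refl 4)]
      have hcond : ∀ (x y : Option Char), (if x = y then res ++ [j] else res) =
          res ++ (if x = y then [j] else []) := by
        intro x y; split <;> simp
      have h2 : PySem.List.pyGetD (a :: b :: c :: rest) (2 : Int) "" = c := by simp [pysem]
      rw [h2]
      exact hcond _ _

-- Per-sentence: A's step equals B's step.
theorem alliter_step (sen : String) (res : List String) :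
    (let sb := PySem.Str.split₀ sen
     if sb.length = 0 then res
     else (sb.foldl (alliterInner (PySem.Str.join " " sb)) (res, 1, 1, none)).1) =
    (let words := PySem.Str.split₀ sen
     if 3 ≤ words.length ∧
         PySem.Str.pyGet? (PySem.List.pyGetD words 2 "") 0
           = PySem.Str.pyGet? (PySem.List.pyGetD words 0 "") 0 then
       res ++ [PySem.Str.join " " words]
     else res) := by
  simp only
  rw [alliterInner_char]
  by_cases h0 : (PySem.Str.split₀ sen).length = 0
  · simp [h0]
  · simp only [h0, if_false]
    split <;> simp

-- ===== VERDICT (by name: the statement is the Claim_ definition above) =====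
theorem alliter_spec : Claim_equal_alliter := by
  intro S hd
  unfold Spec_alliter alliter alliter_alt
  induction S using List.reverseRecOn with
  | nil => rfl
  | append_singleton S sen ih =>
      have hS : Dom_alliter S := by simp_all [Dom_alliter]
      simp only [List.foldl_append, List.foldl_cons, List.foldl_nil]
      rw [← ih hS, alliter_step]
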